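-- pv_equiv track=rewrite | github.com/pharmpy/pharmpy | src/pysn/api_nonmem/model.py | create_unique_symbol
-- ===== SOURCE A (Python) =====
-- def create_unique_symbol(symbols, prefix):
--     """Creates a unique symbol with prefix given a list of used symbols"""
--     count = 1
--     while True:
--         candidate = prefix + str(count)
--         if candidate in symbols:
--             count += 1
--         else:
--             return candidate
-- ===== SOURCE B (Python) =====
-- def create_unique_symbol(symbols, prefix):
--     """Creates a unique symbol with prefix given a list of used symbols.
--
--     Single pass: parse each symbol's suffix as a canonical positive decimal
--     number, collect the used numbers in a set, then one sorted scan finds the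
--     first free number -- no repeated guess-and-check membership loop."""
--     p = len(prefix)
--     used = set()
--     for s in symbols:
--         if s.startswith(prefix) and len(s) > p and s[p] != '0':
--             n = 0
--             ok = True
--             for ch in s[p:]:
--                 if '0' <= ch <= '9':
--                     n = n * 10 + (ord(ch) - 48)
--                 else:
--                     ok = False
--                     break
--             if ok:
--                 used.add(n)
--     expected = 1
--     for n in sorted(used):
--         if n == expected:
--             expected += 1
--         elif n > expected:
--             break
--     return prefix + str(expected)
-- ===== Notes on version B (the rewrite author's own statement) =====
-- stated objective: alternative
-- what changed: A's guess-and-check while-loop (build prefix+str(count), test membership, increment) is replaced by one pass that parses each symbol's suffix as a canonical positive decimal into a set of used numbers, followed by a single scan of the sorted set to find the first free number.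
import Mathlib
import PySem

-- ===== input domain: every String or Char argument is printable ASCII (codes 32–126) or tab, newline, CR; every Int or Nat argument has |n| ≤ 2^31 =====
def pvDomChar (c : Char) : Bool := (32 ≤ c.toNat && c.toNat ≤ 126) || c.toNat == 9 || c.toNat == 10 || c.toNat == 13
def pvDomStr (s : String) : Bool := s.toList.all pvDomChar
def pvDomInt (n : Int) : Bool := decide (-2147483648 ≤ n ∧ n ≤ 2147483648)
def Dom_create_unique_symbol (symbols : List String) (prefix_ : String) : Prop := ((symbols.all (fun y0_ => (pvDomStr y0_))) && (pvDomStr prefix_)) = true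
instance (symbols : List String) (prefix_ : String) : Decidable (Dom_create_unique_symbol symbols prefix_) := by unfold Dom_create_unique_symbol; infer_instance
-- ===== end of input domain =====

-- B replaces A's guess-and-check while-loop by one parse-the-suffixes pass plus one sorted scan
-- (alternative decomposition; same observable return value, no mutation in either version).

-- ===== PORT A =====
-- 'while True' loop; fuel |symbols|+1 is always sufficient (a pigeonhole argument proved
-- below shows the loop returns before the fuel runs out, so "" is never returned).
def pvLoopA (symbols : List String) (prefix_ : String) : Int → Nat → String
  | _, 0 => ""
  | count, fuel+1 =>
    let candidate := prefix_ ++ PySem.Int.toStr count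
    if candidate ∈ symbols then pvLoopA symbols prefix_ (count + 1) fuel
    else candidate

def create_unique_symbol (symbols : List String) (prefix_ : String) : String :=
  pvLoopA symbols prefix_ 1 (symbols.length + 1)

-- ===== PORT B =====
-- inner 'for ch in s[p:]' loop of Source B (break on a non-digit => none)
def pvHorner? : List Char → Int → Option Int
  | [], n => some n
  | ch :: rest, n =>
    if '0' ≤ ch ∧ ch ≤ '9' then pvHorner? rest (n * 10 + ((ch.toNat : Int) - 48))
    else none

-- body of Source B's first loop: the parsed suffix number of s, if any
def pvParse? (prefix_ : String) (s : String) : Option Int :=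
  if PySem.Str.startswith s prefix_ = true ∧ prefix_.toList.length < s.toList.length
      ∧ s.toList[prefix_.toList.length]? ≠ some '0'
  then pvHorner? (s.toList.drop prefix_.toList.length) 0
  else none

-- second loop of Source B: 'for n in sorted(used): …' with break
def pvScan : List Int → Int → Int
  | [], e => e
  | n :: rest, e =>
    if n = e then pvScan rest (e + 1)
    else if n > e then e
    else pvScan rest e

def create_unique_symbol_alt (symbols : List String) (prefix_ : String) : String :=
  let used : PySem.Set Int :=
    symbols.foldl (fun u s =>
      match pvParse? prefix_ s with
      | some n => PySem.Set.add u n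
      | none => u) PySem.Set.empty
  let expected := pvScan (PySem.List.sorted used (fun x => x) false) 1
  prefix_ ++ PySem.Int.toStr expected

-- ===== PRECONDITION & SPEC =====
def Spec_create_unique_symbol (symbols : List String) (prefix_ : String) (out : String) : Prop := out = create_unique_symbol_alt symbols prefix_
instance (symbols : List String) (prefix_ : String) (out : String) : Decidable (Spec_create_unique_symbol symbols prefix_ out) := by unfold Spec_create_unique_symbol; infer_instance

-- ===== CLAIM (what is proved, stated in full; the proofs are below) =====
def Claim_equal_create_unique_symbol : Prop := ∀ (symbols : List String) (prefix_ : String), Dom_create_unique_symbol symbols prefix_ → Spec_create_unique_symbol symbols prefix_ (create_unique_symbol symbols prefix_)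

-- ===== LEMMAS AND PROOFS =====

-- characters
theorem pvChar_eq_of_toNat {a b : Char} (h : a.toNat = b.toNat) : a = b :=
  Char.ext (UInt32.toNat_inj.mp h)

theorem pvDigit_iff (c : Char) : ('0' ≤ c ∧ c ≤ '9') ↔ (48 ≤ c.toNat ∧ c.toNat ≤ 57) := by
  rw [Char.le_def, Char.le_def, UInt32.le_iff_toNat_le, UInt32.le_iff_toNat_le]
  exact Iff.rfl

theorem pvDigitChar_toNat (d : Nat) (h : d < 10) : (Nat.digitChar d).toNat = 48 + d := by
  interval_cases d <;> rfl

-- decimal value of a digit string (Nat mirror of pvHorner?)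
def pvNatVal (ds : List Char) (a : Nat) : Nat :=
  ds.foldl (fun n c => n * 10 + (c.toNat - 48)) a

theorem pvNatVal_nil (a : Nat) : pvNatVal [] a = a := rfl

theorem pvNatVal_cons (c : Char) (t : List Char) (a : Nat) :
    pvNatVal (c :: t) a = pvNatVal t (a * 10 + (c.toNat - 48)) := by
  simp only [pvNatVal, List.foldl_cons]

theorem pvNatVal_append (l : List Char) (c : Char) (a : Nat) :
    pvNatVal (l ++ [c]) a = pvNatVal l a * 10 + (c.toNat - 48) := by
  simp only [pvNatVal, List.foldl_append, List.foldl_cons, List.foldl_nil]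

-- canonical decimal representation (Nat.toDigits 10, made inductively tractable)
def pvDecRep (k : Nat) : List Char :=
  if _h : k < 10 then [Nat.digitChar k]
  else pvDecRep (k / 10) ++ [Nat.digitChar (k % 10)]
decreasing_by exact Nat.div_lt_self (by omega) (by omega)

theorem pvDecRep_spec (k : Nat) :
    pvDecRep k ≠ [] ∧ (∀ c ∈ pvDecRep k, '0' ≤ c ∧ c ≤ '9') ∧
    (1 ≤ k → (pvDecRep k).head? ≠ some '0') ∧ pvNatVal (pvDecRep k) 0 = k := by
  induction k using Nat.strong_induction_on with
  | _ k ih =>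
    rw [pvDecRep]
    split_ifs with h
    · refine ⟨by simp, ?_, ?_, ?_⟩
      · intro c hc
        simp at hc
        subst hc
        rw [pvDigit_iff, pvDigitChar_toNat k h]
        omega
      · intro hk hcontra
        simp at hcontra
        have := congrArg Char.toNat hcontra
        rw [pvDigitChar_toNat k h] at this
        simp [Char.toNat] at this
        omega
      · rw [pvNatVal_cons, pvNatVal_nil, pvDigitChar_toNat k h]
        omega
    · have hk10 : 10 ≤ k := by omega
      have hlt : k / 10 < k := Nat.div_lt_self (by omega) (by omega)
      obtain ⟨hne, hdig, hhead, hval⟩ := ih (k / 10) hlt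
      refine ⟨by simp, ?_, ?_, ?_⟩
      · intro c hc
        rcases List.mem_append.mp hc with h1 | h1
        · exact hdig c h1
        · simp at h1
          subst h1
          rw [pvDigit_iff, pvDigitChar_toNat _ (by omega)]
          omega
      · intro _ hcontra
        obtain ⟨a, t, hat⟩ := List.exists_cons_of_ne_nil hne
        rw [hat] at hcontra
        simp at hcontra
        have : (pvDecRep (k / 10)).head? ≠ some '0' := hhead (by omega)
        rw [hat] at this
        simp at this
        exact this hcontra
      · rw [pvNatVal_append, hval, pvDigitChar_toNat _ (by omega : k % 10 < 10)]
        omega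

-- uniqueness: a nonempty all-digit string without a leading zero is pvDecRep of its value
theorem pvNatVal_canon : ∀ ds : List Char, (∀ c ∈ ds, '0' ≤ c ∧ c ≤ '9') →
    ds.head? ≠ some '0' → ds ≠ [] →
    1 ≤ pvNatVal ds 0 ∧ pvDecRep (pvNatVal ds 0) = ds := by
  intro ds
  induction ds using List.reverseRecOn with
  | nil => intro _ _ h; exact absurd rfl h
  | append_singleton l c ih =>
    intro hdig hhead _
    have hcd : '0' ≤ c ∧ c ≤ '9' := hdig c (by simp)
    have hcnat : 48 ≤ c.toNat ∧ c.toNat ≤ 57 := (pvDigit_iff c).mp hcd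
    rw [pvNatVal_append]
    rcases l with _ | ⟨a, l'⟩
    · rw [pvNatVal_nil, List.nil_append]
      have hc0 : c ≠ '0' := by
        intro h
        exact hhead (by rw [h]; rfl)
      have h48 : c.toNat ≠ 48 := fun h =>
        hc0 (pvChar_eq_of_toNat (h.trans (by decide : (48 : Nat) = '0'.toNat)))
      have hval0 : (0 : Nat) * 10 + (c.toNat - 48) = c.toNat - 48 := by omega
      rw [hval0]
      constructor
      · omega
      · rw [pvDecRep]
        rw [dif_pos (by omega)]
        have : Nat.digitChar (c.toNat - 48) = c := by
          apply pvChar_eq_of_toNat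
          rw [pvDigitChar_toNat _ (by omega)]
          omega
        rw [this]
    · have hl : (a :: l') ≠ [] := by simp
      have hdig' : ∀ x ∈ a :: l', '0' ≤ x ∧ x ≤ '9' :=
        fun x hx => hdig x (List.mem_append.mpr (Or.inl hx))
      have hhead' : (a :: l').head? ≠ some '0' := by simpa using hhead
      obtain ⟨hq1, hq⟩ := ih hdig' hhead' hl
      set q := pvNatVal (a :: l') 0 with hqd
      constructor
      · omega
      · rw [pvDecRep]
        rw [dif_neg (by omega)]
        have hdiv : (q * 10 + (c.toNat - 48)) / 10 = q := by omega
        have hmod : (q * 10 + (c.toNat - 48)) % 10 = c.toNat - 48 := by omega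
        rw [hdiv, hmod, hq]
        have : Nat.digitChar (c.toNat - 48) = c := by
          apply pvChar_eq_of_toNat
          rw [pvDigitChar_toNat _ (by omega)]
          omega
        rw [this]

-- core's Nat.toDigits is pvDecRep
theorem pvToDigitsCore_eq : ∀ (fuel n : Nat) (ds : List Char), n < fuel →
    Nat.toDigitsCore 10 fuel n ds = pvDecRep n ++ ds := by
  intro fuel
  induction fuel with
  | zero => intro n ds h; omega
  | succ f ihf =>
    intro n ds h
    rw [Nat.toDigitsCore]
    by_cases h10 : n / 10 = 0
    · simp only [h10]
      rw [pvDecRep, dif_pos (by omega)]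
      have : n % 10 = n := by omega
      rw [this]
      simp
    · rw [if_neg h10]
      have hn0 : 0 < n := by
        rcases Nat.eq_zero_or_pos n with h0 | h0
        · subst h0; simp at h10
        · exact h0
      have hlt : n / 10 < f := by
        have h2 : n / 10 < n := Nat.div_lt_self hn0 (by norm_num)
        omega
      rw [ihf (n / 10) _ hlt]
      conv_rhs => rw [pvDecRep]
      rw [dif_neg (show ¬ n < 10 by omega)]
      simp

theorem pvToDigits_eq (n : Nat) : Nat.toDigits 10 n = pvDecRep n := by
  have := pvToDigitsCore_eq (n + 1) n [] (by omega)
  simpa [Nat.toDigits] using this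

theorem pvToChars_pos (m : Int) (hm : 1 ≤ m) :
    PySem.Int.toChars m = pvDecRep m.toNat := by
  unfold PySem.Int.toChars
  rw [if_neg (by omega)]
  exact pvToDigits_eq m.toNat

-- pvHorner? characterisation
theorem pvHorner?_of_digits : ∀ (ds : List Char), (∀ c ∈ ds, '0' ≤ c ∧ c ≤ '9') →
    ∀ a : Nat, pvHorner? ds (a : Int) = some ((pvNatVal ds a : Nat) : Int) := by
  intro ds
  induction ds with
  | nil => intro _ a; rfl
  | cons c t ih =>
    intro hdig a
    have hc := hdig c (by simp)
    have hcn := (pvDigit_iff c).mp hc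
    rw [pvHorner?, if_pos hc, pvNatVal_cons]
    have hcast : (a : Int) * 10 + ((c.toNat : Int) - 48) = ((a * 10 + (c.toNat - 48) : Nat) : Int) := by
      omega
    rw [hcast]
    exact ih (fun x hx => hdig x (by simp [hx])) _

theorem pvHorner?_inv : ∀ (ds : List Char) (a : Nat) (m : Int),
    pvHorner? ds (a : Int) = some m →
    (∀ c ∈ ds, '0' ≤ c ∧ c ≤ '9') ∧ m = ((pvNatVal ds a : Nat) : Int) := by
  intro ds
  induction ds with
  | nil =>
    intro a m h
    simp [pvHorner?] at h
    exact ⟨by simp, by simp [pvNatVal_nil, h.symm]⟩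
  | cons c t ih =>
    intro a m h
    rw [pvHorner?] at h
    split_ifs at h with hc
    · have hcn := (pvDigit_iff c).mp hc
      have hcast : (a : Int) * 10 + ((c.toNat : Int) - 48) = ((a * 10 + (c.toNat - 48) : Nat) : Int) := by
        omega
      rw [hcast] at h
      obtain ⟨hd, hv⟩ := ih _ m h
      refine ⟨?_, ?_⟩
      · intro x hx
        rcases List.mem_cons.mp hx with h1 | h1
        · subst h1; exact hc
        · exact hd x h1
      · rw [pvNatVal_cons]; exact hv

-- the parse function hits exactly the canonical candidates
theorem pvParse?_iff (prefix_ s : String) (m : Int) (hm : 1 ≤ m) :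
    pvParse? prefix_ s = some m ↔ s = prefix_ ++ PySem.Int.toStr m := by
  constructor
  · intro hp
    unfold pvParse? at hp
    split_ifs at hp with hcond
    obtain ⟨hstart, hlen, hz⟩ := hcond
    rw [PySem.Str.startswith_eq, PySem.Chars.startswith_iff] at hstart
    obtain ⟨rest, hrest⟩ := hstart
    have hdrop : s.toList.drop prefix_.toList.length = rest := by
      rw [← hrest]; exact List.drop_left
    rw [hdrop] at hp
    have h0 : ((0 : Nat) : Int) = (0 : Int) := by norm_num
    rw [← h0] at hp
    obtain ⟨hdig, hval⟩ := pvHorner?_inv rest 0 m hp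
    have hrne : rest ≠ [] := by
      intro hcontra
      subst hcontra
      rw [List.append_nil] at hrest
      rw [hrest] at hlen
      omega
    have hhead : rest.head? ≠ some '0' := by
      rw [← hdrop, List.head?_drop]
      exact hz
    obtain ⟨hk1, hcanon⟩ := pvNatVal_canon rest hdig hhead hrne
    rw [← String.toList_inj, String.toList_append, PySem.Int.toList_toStr,
        pvToChars_pos m (by omega)]
    have : m.toNat = pvNatVal rest 0 := by omega
    rw [this, hcanon, hrest]
  · intro hs
    subst hs
    have htl : (prefix_ ++ PySem.Int.toStr m).toList
        = prefix_.toList ++ pvDecRep m.toNat := by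
      rw [String.toList_append, PySem.Int.toList_toStr, pvToChars_pos m hm]
    obtain ⟨hne, hdig, hhead, hval⟩ := pvDecRep_spec m.toNat
    unfold pvParse?
    rw [if_pos]
    · rw [htl, List.drop_left]
      have h0 : ((0 : Nat) : Int) = (0 : Int) := by norm_num
      rw [← h0, pvHorner?_of_digits _ hdig, hval]
      congr 1
      omega
    · refine ⟨?_, ?_, ?_⟩
      · rw [PySem.Str.startswith_eq, PySem.Chars.startswith_iff, htl]
        exact ⟨pvDecRep m.toNat, rfl⟩
      · rw [htl]
        simp
        exact List.length_pos_iff.mpr hne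
      · rw [← List.head?_drop, htl, List.drop_left]
        exact hhead (by omega)

-- candidates with distinct numbers are distinct strings
theorem pvCandidate_inj (prefix_ : String) (m1 m2 : Int) (h1 : 1 ≤ m1) (h2 : 1 ≤ m2)
    (h : prefix_ ++ PySem.Int.toStr m1 = prefix_ ++ PySem.Int.toStr m2) : m1 = m2 := by
  rw [← String.toList_inj, String.toList_append, String.toList_append] at h
  have h' := List.append_cancel_left h
  rw [PySem.Int.toList_toStr, PySem.Int.toList_toStr, pvToChars_pos m1 h1, pvToChars_pos m2 h2] at h'
  have hv1 := (pvDecRep_spec m1.toNat).2.2.2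
  have hv2 := (pvDecRep_spec m2.toNat).2.2.2
  have : m1.toNat = m2.toNat := by rw [← hv1, ← hv2, h']
  omega

-- B's first loop builds set(filterMap parse)
theorem pvFoldl_add_filterMap (prefix_ : String) :
    ∀ (l : List String) (acc : List Int),
    l.foldl (fun u s =>
      match pvParse? prefix_ s with
      | some n => PySem.Set.add u n
      | none => u) acc
    = (l.filterMap (pvParse? prefix_)).foldl PySem.Set.add acc := by
  intro l
  induction l with
  | nil => intro acc; rfl
  | cons s t ih =>
    intro acc
    rw [List.foldl_cons, List.filterMap_cons]
    cases hp : pvParse? prefix_ s with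
    | none => simpa using ih acc
    | some n => simpa using ih (PySem.Set.add acc n)

-- B's second loop returns the first free number ≥ e of a strictly sorted list
theorem pvScan_spec : ∀ (L : List Int) (e : Int), L.Pairwise (· < ·) →
    e ≤ pvScan L e ∧ pvScan L e ∉ L ∧ ∀ m, e ≤ m → m < pvScan L e → m ∈ L := by
  intro L
  induction L with
  | nil =>
    intro e _
    refine ⟨by simp [pvScan], by simp, ?_⟩
    intro m h1 h2
    simp [pvScan] at h2
    omega
  | cons n t ih =>
    intro e hp
    rw [List.pairwise_cons] at hp
    obtain ⟨hn, hpt⟩ := hp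
    rw [pvScan]
    split_ifs with h1 h2
    · subst h1
      obtain ⟨ha, hb, hc⟩ := ih (n + 1) hpt
      refine ⟨by omega, ?_, ?_⟩
      · intro hcontra
        rcases List.mem_cons.mp hcontra with h | h
        · omega
        · exact hb h
      · intro m hm1 hm2
        by_cases hme : m = n
        · simp [hme]
        · exact List.mem_cons_of_mem _ (hc m (by omega) hm2)
    · refine ⟨le_refl e, ?_, by omega⟩
      intro hcontra
      rcases List.mem_cons.mp hcontra with h | h
      · omega
      · have := hn e h
        omega
    · have hne : n < e := by omega
      obtain ⟨ha, hb, hc⟩ := ih e hpt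
      refine ⟨ha, ?_, ?_⟩
      · intro hcontra
        rcases List.mem_cons.mp hcontra with h | h
        · omega
        · exact hb h
      · intro m hm1 hm2
        exact List.mem_cons_of_mem _ (hc m hm1 hm2)

-- pigeonhole: if all candidates 1..r-1 are used, r ≤ |symbols| + 1
theorem pvBound (symbols : List String) (prefix_ : String) (r : Int) (h1 : 1 ≤ r)
    (hC : ∀ m : Int, 1 ≤ m → m < r → prefix_ ++ PySem.Int.toStr m ∈ symbols) :
    r ≤ (symbols.length : Int) + 1 := by
  set K := (r - 1).toNat with hK
  have hmaps : ∀ i ∈ Finset.range K, prefix_ ++ PySem.Int.toStr (1 + (i : Int)) ∈ symbols.toFinset := by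
    intro i hi
    rw [Finset.mem_range] at hi
    exact List.mem_toFinset.mpr (hC _ (by omega) (by omega))
  have hinj : Set.InjOn (fun i : Nat => prefix_ ++ PySem.Int.toStr (1 + (i : Int))) (Finset.range K) := by
    intro i hi j hj hij
    have := pvCandidate_inj prefix_ (1 + (i : Int)) (1 + (j : Int)) (by omega) (by omega) hij
    omega
  have hcard := Finset.card_le_card_of_injOn _ hmaps hinj
  rw [Finset.card_range] at hcard
  have hfin : symbols.toFinset.card ≤ symbols.length := symbols.toFinset_card_le
  omega

-- A's loop reaches the first free candidate before the fuel runs out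
theorem pvLoopA_eq (symbols : List String) (prefix_ : String) (r : Int)
    (hC1 : ∀ m : Int, 1 ≤ m → m < r → prefix_ ++ PySem.Int.toStr m ∈ symbols)
    (hC2 : prefix_ ++ PySem.Int.toStr r ∉ symbols) :
    ∀ (fuel : Nat) (count : Int), 1 ≤ count → count ≤ r → (r - count).toNat < fuel →
    pvLoopA symbols prefix_ count fuel = prefix_ ++ PySem.Int.toStr r := by
  intro fuel
  induction fuel with
  | zero => intro count _ _ h; omega
  | succ f ih =>
    intro count hc1 hc2 hf
    rw [pvLoopA]
    by_cases hcr : count = r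
    · subst hcr
      rw [if_neg hC2]
    · rw [if_pos (hC1 count hc1 (by omega))]
      exact ih (count + 1) (by omega) (by omega) (by omega)

-- ===== VERDICT (by name: the statement is the Claim_ definition above) =====
theorem create_unique_symbol_spec : Claim_equal_create_unique_symbol := by
  intro symbols prefix_ _hdom
  unfold Spec_create_unique_symbol
  -- name B's intermediate data
  have halt : create_unique_symbol_alt symbols prefix_
      = prefix_ ++ PySem.Int.toStr
          (pvScan (PySem.List.sorted
            (PySem.Set.ofList (symbols.filterMap (pvParse? prefix_))) (fun x => x) false) 1) := by
    simp only [create_unique_symbol_alt]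
    rw [pvFoldl_add_filterMap]
    rw [show (PySem.Set.empty : PySem.Set Int) = ([] : List Int) from rfl]
    rw [← PySem.Set.ofList_eq_foldl]
  set L := PySem.List.sorted (PySem.Set.ofList (symbols.filterMap (pvParse? prefix_))) (fun x => x) false with hL
  set r := pvScan L 1 with hr
  have hpair : L.Pairwise (· < ·) := PySem.List.sorted_ofList_pairwise_lt _
  have hmemL : ∀ m : Int, m ∈ L ↔ ∃ s ∈ symbols, pvParse? prefix_ s = some m := by
    intro m
    rw [hL, PySem.List.mem_sorted, PySem.Set.mem_ofList, List.mem_filterMap]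
  obtain ⟨hr1, hrnot, hrall⟩ := pvScan_spec L 1 hpair
  have hC1 : ∀ m : Int, 1 ≤ m → m < r → prefix_ ++ PySem.Int.toStr m ∈ symbols := by
    intro m hm1 hm2
    obtain ⟨s, hs, hp⟩ := (hmemL m).mp (hrall m hm1 hm2)
    rw [(pvParse?_iff prefix_ s m hm1).mp hp] at hs
    exact hs
  have hC2 : prefix_ ++ PySem.Int.toStr r ∉ symbols := by
    intro hcontra
    exact hrnot ((hmemL r).mpr ⟨_, hcontra, (pvParse?_iff prefix_ _ r hr1).mpr rfl⟩)
  have hbound := pvBound symbols prefix_ r hr1 hC1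
  have hA : create_unique_symbol symbols prefix_ = prefix_ ++ PySem.Int.toStr r := by
    unfold create_unique_symbol
    exact pvLoopA_eq symbols prefix_ r hC1 hC2 (symbols.length + 1) 1 (by omega) hr1 (by omega)
  rw [hA, halt]
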